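-- pv_equiv track=rewrite | github.com/juandarr/ProjectEuler | 146.py | check_others_primes
-- ===== SOURCE A (Python) =====
-- import math
--
-- def check_others_primes(num, primes):
--     limit = int(math.sqrt(num+27))
--     primality = [True]*27
--     values = [i for i in range(27) if i not in [0,2,6,8,12,26]]
--     for p in primes:
--         if p>limit:
--             s = sum([1 for t in primality if t==True])
--             return s
--         to_remove = []
--         for i in values:
--             if (num+i+1)%p==0:
--                 to_remove.append(i)
--                 primality[i]=False
--         for rem in to_remove:
--             values.remove(rem)
--         if values==[]:
--             return 6
-- ===== SOURCE B (Python) =====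
-- import math
--
-- OFFSETS = [1, 3, 4, 5, 7, 9, 10, 11, 13, 14, 15, 16, 17, 18, 19, 20, 21, 22, 23, 24, 25]
--
-- def check_others_primes(num, primes):
--     limit = int(math.sqrt(num + 27))
--     small = []
--     has_big = False
--     for p in primes:
--         if p > limit:
--             has_big = True
--             break
--         small.append(p)
--     survivors = sum(1 for i in OFFSETS
--                     if all((num + i + 1) % p != 0 for p in small))
--     if has_big:
--         return 6 + survivors
--     if survivors == 0:
--         return 6
--     return None
-- ===== Notes on version B (the rewrite author's own statement) =====
-- stated objective: simpler
-- what changed: A incrementally sieves a mutable 27-entry primality table and a shrinking candidate list prime by prime; B first takes the prefix of primes up to the limit and then counts, per fixed offset, whether any prefix prime divides num+i+1 (the reviewer's Miller-Rabin idea would not be exact, since A's result depends on the supplied primes list, not on true primality).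
-- outside the precondition, e.g. on check_others_primes(514, [2, 3, 5, 7, 11, 13, 17, 19, 23, 0]): A returns 6, B returns 6
import Mathlib
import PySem

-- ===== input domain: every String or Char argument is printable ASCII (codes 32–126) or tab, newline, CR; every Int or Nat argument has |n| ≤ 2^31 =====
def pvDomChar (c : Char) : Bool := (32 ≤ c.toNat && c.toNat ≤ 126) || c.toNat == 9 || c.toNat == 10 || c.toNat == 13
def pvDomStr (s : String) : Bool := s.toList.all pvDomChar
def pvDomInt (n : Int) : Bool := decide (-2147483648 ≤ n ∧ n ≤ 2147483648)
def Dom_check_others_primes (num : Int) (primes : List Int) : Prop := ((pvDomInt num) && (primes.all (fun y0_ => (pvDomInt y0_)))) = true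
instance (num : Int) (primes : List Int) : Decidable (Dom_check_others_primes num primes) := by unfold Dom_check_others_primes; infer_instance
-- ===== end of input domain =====

-- B replaces A's per-prime sieve with list mutation by a single per-offset divisibility
-- scan over the prefix of primes up to the limit (objective: simpler; same exact values).


-- ===== PORT A =====
-- integer square root by fueled binary search: for 0 ≤ n this is exactly ⌊√n⌋ whenever
-- n < 2^60 (64 halvings always converge), hence exactly Python's int(math.sqrt(n)) on the
-- domain |n| ≤ 2^31 + 27, where the double sqrt truncates to ⌊√n⌋
def pvSqrtSearch : Nat → Nat → Nat → Nat → Nat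
  | 0, _, lo, _ => lo
  | f + 1, n, lo, hi =>
    let m := (lo + hi) / 2
    if m = lo then lo
    else if m * m ≤ n then pvSqrtSearch f n m hi
    else pvSqrtSearch f n lo m

def pvISqrt (n : Nat) : Nat := pvSqrtSearch 64 n 0 (n + 1)

-- the for-loop over primes, carrying the mutable state (primality, values)
def pvALoop (num limit : Int) : List Int → List Bool → List Int → Option Int
  | [], _, _ => none
  | p :: ps, primality, values =>
    if p > limit then
      some ((primality.countP (fun t => t == true) : Nat) : Int)
    else
      -- inner for-loop over values: builds to_remove and sets primality[i] = False
      -- (i is always in range(27) and nonnegative, so .set i.toNat is exact here)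
      let st := values.foldl
        (fun (st : List Int × List Bool) i =>
          if PySem.Int.mod (num + i + 1) p == 0 then (st.1 ++ [i], st.2.set i.toNat false)
          else st)
        (([] : List Int), primality)
      -- for rem in to_remove: values.remove(rem) — rem is always present, so List.erase is exact
      let values' := st.1.foldl (fun vs rem => vs.erase rem) values
      if values' == [] then some 6 else pvALoop num limit ps st.2 values'

def check_others_primes (num : Int) (primes : List Int) : Option Int :=
  -- int(math.sqrt(num+27)): pvISqrt, exact on 0 ≤ num + 27 (Pre_)
  let limit : Int := (pvISqrt (num + 27).toNat : Nat)
  let primality := List.replicate 27 true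
  let values := (PySem.List.pyRange 0 27 1).filter (fun i => !([0,2,6,8,12,26].contains i))
  pvALoop num limit primes primality values

-- ===== PORT B =====
-- Source B's for-loop with break: the primes before the first one > limit, and whether a break happened
def pvBSplit (limit : Int) : List Int → List Int × Bool
  | [] => ([], false)
  | p :: ps =>
    if p > limit then ([], true)
    else
      let r := pvBSplit limit ps
      (p :: r.1, r.2)

def check_others_primes_alt (num : Int) (primes : List Int) : Option Int :=
  let limit : Int := (pvISqrt (num + 27).toNat : Nat)  -- same int(math.sqrt(num+27)), see PORT A
  let offsets : List Int := [1, 3, 4, 5, 7, 9, 10, 11, 13, 14, 15, 16, 17, 18, 19, 20, 21, 22, 23, 24, 25]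
  let sb := pvBSplit limit primes
  let survivors : Int :=
    ((offsets.countP (fun i => sb.1.all (fun p => PySem.Int.mod (num + i + 1) p != 0)) : Nat) : Int)
  if sb.2 then some (6 + survivors)
  else if survivors == 0 then some 6
  else none

-- ===== PRECONDITION & SPEC =====
-- Pre_ excludes num < -27 (math.sqrt of a negative raises ValueError) and inputs where 0 occurs
-- among the primes before the first prime exceeding the limit (the modulo raises
-- ZeroDivisionError when the loop reaches it; B raises there as well, except in the rare case
-- where every offset was already eliminated by an earlier prime, where both return 6).
def Pre_check_others_primes (num : Int) (primes : List Int) : Prop :=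
  0 ≤ num + 27 ∧
  ∀ p ∈ primes.takeWhile (fun p => decide (p ≤ ((pvISqrt (num + 27).toNat : Nat) : Int))), p ≠ 0
instance (num : Int) (primes : List Int) : Decidable (Pre_check_others_primes num primes) := by
  unfold Pre_check_others_primes; infer_instance

def pvWitness_check_others_primes : Int × List Int := (3, [2, 5, 100])

def Spec_check_others_primes (num : Int) (primes : List Int) (out : Option Int) : Prop := out = check_others_primes_alt num primes
instance (num : Int) (primes : List Int) (out : Option Int) : Decidable (Spec_check_others_primes num primes out) := by unfold Spec_check_others_primes; infer_instance

-- ===== CLAIM (what is proved, stated in full; the proofs are below) =====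
def Claim_equal_check_others_primes : Prop := ∀ (num : Int) (primes : List Int), Dom_check_others_primes num primes → Pre_check_others_primes num primes → Spec_check_others_primes num primes (check_others_primes num primes)

-- ===== LEMMAS AND PROOFS =====

-- the 21 candidate offsets, as a proof-side constant
def pvOffs : List Int := [1, 3, 4, 5, 7, 9, 10, 11, 13, 14, 15, 16, 17, 18, 19, 20, 21, 22, 23, 24, 25]

-- the primality list after the offsets NOT satisfying q have been set to False
def pvMask (q : Int → Bool) : List Bool :=
  (List.range 27).map (fun (j : Nat) => !(decide ((j : Int) ∈ pvOffs)) || q (j : Int))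

lemma pv_pairFold (c : Int → Bool) :
    ∀ (vs : List Int) (acc : List Int) (prim : List Bool),
      vs.foldl
        (fun (st : List Int × List Bool) i =>
          if c i then (st.1 ++ [i], st.2.set i.toNat false) else st)
        (acc, prim)
      = (acc ++ vs.filter c,
         (vs.filter c).foldl (fun pr i => pr.set i.toNat false) prim) := by
  intro vs
  induction vs with
  | nil => intro acc prim; simp
  | cons x xs ih =>
    intro acc prim
    by_cases hc : c x
    · simp [List.foldl_cons, hc, ih]
    · simp [List.foldl_cons, hc, ih]

lemma pv_eraseFold_cons (x : Int) :
    ∀ (ts l : List Int), x ∉ ts →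
      ts.foldl (fun vs r => vs.erase r) (x :: l) = x :: ts.foldl (fun vs r => vs.erase r) l := by
  intro ts
  induction ts with
  | nil => intro l _; simp
  | cons t ts ih =>
    intro l hx
    have hne : t ≠ x := fun h => hx (by simp [h])
    have : (x :: l).erase t = x :: l.erase t := by
      simp [(by simpa using hne.symm : ¬ x = t)]
    simp only [List.foldl_cons, this]
    exact ih _ (fun h => hx (by simp [h]))

lemma pv_eraseFold_filter (c : Int → Bool) :
    ∀ (l : List Int), l.Nodup →
      (l.filter c).foldl (fun vs r => vs.erase r) l = l.filter (fun i => !(c i)) := by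
  intro l
  induction l with
  | nil => intro _; simp
  | cons x xs ih =>
    intro hnd
    have hx : x ∉ xs := (List.nodup_cons.mp hnd).1
    have hxs : xs.Nodup := (List.nodup_cons.mp hnd).2
    by_cases hc : c x
    · simp only [List.filter_cons, hc, if_pos, List.foldl_cons, List.erase_cons_head]
      simpa [hc] using ih hxs
    · have hxf : x ∉ xs.filter c := fun h => hx (List.mem_of_mem_filter h)
      simp only [List.filter_cons, hc]
      simpa [hc] using (pv_eraseFold_cons x (xs.filter c) xs hxf).trans (by rw [ih hxs])

lemma pv_setFold_get? :
    ∀ (ts : List Int) (prim : List Bool) (j : Nat), (∀ i ∈ ts, 0 ≤ i) →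
      (ts.foldl (fun pr i => pr.set i.toNat false) prim)[j]?
        = if (j : Int) ∈ ts ∧ j < prim.length then some false else prim[j]? := by
  intro ts
  induction ts with
  | nil => intro prim j _; simp
  | cons t ts ih =>
    intro prim j hnn
    have ht : 0 ≤ t := hnn t (by simp)
    have hts : ∀ i ∈ ts, 0 ≤ i := fun i hi => hnn i (by simp [hi])
    simp only [List.foldl_cons]
    rw [ih _ j hts]
    by_cases hmem : (j : Int) ∈ ts
    · by_cases hlt : j < prim.length
      · simp [hmem, hlt, List.length_set]
      · simp [hmem, hlt, List.length_set]
    · by_cases hjt : (j : Int) = t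
      · have htj : t.toNat = j := by omega
        by_cases hlt : j < prim.length
        · simp [hmem, hjt, htj, hlt, List.length_set, List.getElem?_set]
        · simp [hmem, hjt, htj, hlt, List.length_set, List.getElem?_set]
      · have htj : t.toNat ≠ j := by omega
        simp [hmem, hjt, htj, List.length_set, List.getElem?_set]

lemma pv_offs_nonneg : ∀ i ∈ pvOffs, 0 ≤ i := by decide

lemma pv_mask_get? (q : Int → Bool) (j : Nat) :
    (pvMask q)[j]? = if j < 27 then some (!(decide ((j : Int) ∈ pvOffs)) || q (j : Int)) else none := by
  rw [pvMask, List.getElem?_map]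
  by_cases hj : j < 27
  · rw [List.getElem?_range hj, if_pos hj]
    rfl
  · rw [if_neg hj]
    have h : (List.range 27)[j]? = none := by
      rw [List.getElem?_eq_none]
      simpa using Nat.le_of_not_lt hj
    rw [h]
    rfl

lemma pv_mask_len (q : Int → Bool) : (pvMask q).length = 27 := by
  rw [pvMask, List.length_map, List.length_range]

lemma pv_mask_step (q c : Int → Bool) :
    ((pvOffs.filter q).filter c).foldl (fun pr i => pr.set i.toNat false) (pvMask q)
      = pvMask (fun i => q i && !(c i)) := by
  have hnn : ∀ i ∈ (pvOffs.filter q).filter c, 0 ≤ i :=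
    fun i hi => pv_offs_nonneg i (List.mem_of_mem_filter (List.mem_of_mem_filter hi))
  apply List.ext_getElem?
  intro j
  rw [pv_setFold_get? _ _ j hnn, pv_mask_get?, pv_mask_get?]
  have hmem : ((j : Int) ∈ (pvOffs.filter q).filter c) ↔
      (((j : Int) ∈ pvOffs ∧ q (j : Int) = true) ∧ c (j : Int) = true) := by
    simp only [List.mem_filter]
  by_cases hj : j < 27
  · rw [if_pos hj, if_pos hj]
    by_cases hin : (j : Int) ∈ (pvOffs.filter q).filter c
    · obtain ⟨⟨h1, h2⟩, h3⟩ := hmem.mp hin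
      rw [if_pos ⟨hin, by rw [pv_mask_len]; exact hj⟩]
      simp [h1, h2, h3]
    · rw [if_neg (fun h => hin h.1)]
      rcases Decidable.em ((j : Int) ∈ pvOffs) with hm | hm
      · cases hq : q (j : Int)
        · simp [hm, hq]
        · cases hc2 : c (j : Int)
          · simp [hm, hq, hc2]
          · exact absurd (hmem.mpr ⟨⟨hm, hq⟩, hc2⟩) hin
      · simp [hm]
  · rw [if_neg hj, if_neg hj, if_neg]
    intro h
    rw [pv_mask_len] at h
    exact hj h.2

lemma pv_countP_or (l : List Nat) (p r : Nat → Bool) (h : ∀ a ∈ l, !(p a && r a)) :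
    l.countP (fun a => p a || r a) = l.countP p + l.countP r := by
  induction l with
  | nil => simp
  | cons x xs ih =>
    have hx := h x (by simp)
    have ihh := ih (fun a ha => h a (by simp [ha]))
    cases hp : p x <;> cases hr : r x <;>
      simp [List.countP_cons, hp, hr, ihh] <;> first | omega | (simp [hp, hr] at hx)

lemma pv_count_mask (q : Int → Bool) :
    (((pvMask q).countP (fun t => t == true) : Nat) : Int)
      = 6 + (((pvOffs.filter q).length : Nat) : Int) := by
  have key : (pvMask q).countP (fun t => t == true) = 6 + pvOffs.countP q := by
    rw [pvMask, List.countP_map]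
    have e1 : ((fun t => t == true) ∘ fun j : Nat => !(decide ((j : Int) ∈ pvOffs)) || q (j : Int))
        = fun j : Nat => (!(decide ((j : Int) ∈ pvOffs)))
            || (decide ((j : Int) ∈ pvOffs) && q (j : Int)) := by
      funext j
      cases hm : decide ((j : Int) ∈ pvOffs) <;> simp [Function.comp, hm]
    rw [e1, pv_countP_or (List.range 27) (fun j => !(decide ((j : Int) ∈ pvOffs)))
          (fun j => decide ((j : Int) ∈ pvOffs) && q (j : Int))
          (by intro a _; cases hm : decide ((a : Int) ∈ pvOffs) <;> simp [hm])]
    have e2 : (List.range 27).countP (fun (j : Nat) => !(decide ((j : Int) ∈ pvOffs))) = 6 := by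
      decide
    have e3 : ((((List.range 27).map (fun (j : Nat) => (j : Int))).filter
          (fun i => decide (i ∈ pvOffs))).countP q)
        = (List.range 27).countP (fun (j : Nat) => decide ((j : Int) ∈ pvOffs) && q (j : Int)) := by
      rw [List.countP_filter, List.countP_map]
      apply List.countP_congr
      intro a _
      cases hq : q (a : Int) <;> cases hm : decide ((a : Int) ∈ pvOffs) <;>
        simp [Function.comp, hq, hm]
    have hoffs : ((List.range 27).map (fun (j : Nat) => (j : Int))).filter
        (fun i => decide (i ∈ pvOffs)) = pvOffs := by decide
    rw [e2, ← e3, hoffs]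
  rw [key, List.countP_eq_length_filter]
  push_cast
  omega

lemma pv_main (num limit : Int) :
    ∀ (ps : List Int) (q : Int → Bool), pvOffs.filter q ≠ [] →
      pvALoop num limit ps (pvMask q) (pvOffs.filter q)
        = (let sb := pvBSplit limit ps
           let s : Int := (((pvOffs.filter q).countP
             (fun i => sb.1.all (fun p => PySem.Int.mod (num + i + 1) p != 0)) : Nat) : Int)
           if sb.2 then some (6 + s) else if s == 0 then some 6 else none) := by
  intro ps
  induction ps with
  | nil =>
    intro q hne
    have hlen : (pvOffs.filter q).length ≠ 0 := by
      simpa [List.length_eq_zero_iff] using hne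
    simp only [pvALoop, pvBSplit]
    simp [hlen]
  | cons p ps ih =>
    intro q hne
    by_cases hp : p > limit
    · simp only [pvALoop, pvBSplit, hp, if_pos]
      rw [pv_count_mask]
      simp
    · simp only [pvALoop, pvBSplit, hp, if_neg, ite_false]
      rw [pv_pairFold (fun i => PySem.Int.mod (num + i + 1) p == 0)]
      simp only [List.nil_append]
      have hnd : (pvOffs.filter q).Nodup := List.Nodup.filter _ (by decide)
      rw [pv_eraseFold_filter _ _ hnd, pv_mask_step]
      have hff : (pvOffs.filter q).filter (fun i => !(PySem.Int.mod (num + i + 1) p == 0))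
          = pvOffs.filter (fun i => q i && !(PySem.Int.mod (num + i + 1) p == 0)) := by
        rw [List.filter_filter]
        apply List.filter_congr
        intro a _
        rw [Bool.and_comm]
      set q' : Int → Bool := fun i => q i && !(PySem.Int.mod (num + i + 1) p == 0) with hq'
      have hcount : ∀ (small : List Int),
          ((pvOffs.filter q).countP
            (fun i => (p :: small).all (fun r => PySem.Int.mod (num + i + 1) r != 0)) : Nat)
          = ((pvOffs.filter q').countP
            (fun i => small.all (fun r => PySem.Int.mod (num + i + 1) r != 0)) : Nat) := by
        intro small
        rw [List.countP_filter, List.countP_filter]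
        apply List.countP_congr
        intro a _
        simp only [List.all_cons, hq']
        cases hm : (PySem.Int.mod (num + a + 1) p == 0) <;>
          cases hqa : q a <;> simp [bne, hm, hqa]
      by_cases hemp : pvOffs.filter q' = []
      · rw [hff, hemp]
        have hz : ((pvOffs.filter q).countP
            (fun i => (p :: (pvBSplit limit ps).1).all
              (fun r => PySem.Int.mod (num + i + 1) r != 0))) = 0 := by
          rw [hcount (pvBSplit limit ps).1, hemp]; simp
        rw [hz]
        cases hb : (pvBSplit limit ps).2 <;> simp [hb]
      · rw [hff]
        rw [if_neg (by simpa using hemp)]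
        rw [ih q' hemp]
        simp only [hcount (pvBSplit limit ps).1]

-- ===== VERDICT (by name: the statement is the Claim_ definition above) =====
theorem check_others_primes_spec : Claim_equal_check_others_primes := by
  intro num primes _ _
  unfold Spec_check_others_primes
  show check_others_primes num primes = check_others_primes_alt num primes
  unfold check_others_primes check_others_primes_alt
  have h1 : (PySem.List.pyRange 0 27 1).filter (fun i => !([0,2,6,8,12,26].contains i))
      = pvOffs.filter (fun _ => true) := by decide
  have h2 : (List.replicate 27 true) = pvMask (fun _ => true) := by decide
  simp only [h1, h2]
  rw [pv_main num _ primes (fun _ => true) (by decide)]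
  have h3 : pvOffs.filter (fun _ => true) = pvOffs := by decide
  simp only [h3]
  rfl
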